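-- pv_equiv track=rewrite | github.com/Maayan99/SHINE | experiments/eval/stc_eval.py | pick_sweep_prompts
-- ===== SOURCE A (Python) =====
-- from collections import defaultdict
--
-- def pick_sweep_prompts(prompt_groups):
--     """Pick 3 diverse prompts for LR sweep (one each from different categories)."""
--     by_category = defaultdict(list)
--     for sp_id, entries in prompt_groups.items():
--         cat = entries[0]["category"]
--         by_category[cat].append(sp_id)
--
--     # Prefer these categories for diversity
--     preferred = ["persona", "simulation", "composite", "educational", "professional"]
--     selected = []
--     used_cats = set()
--     for cat in preferred:
--         if cat in by_category and cat not in used_cats: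
--             selected.append(by_category[cat][0])
--             used_cats.add(cat)
--             if len(selected) == 3:
--                 break
--
--     # Fill remaining from any category
--     if len(selected) < 3:
--         for cat, sps in by_category.items():
--             if cat not in used_cats:
--                 selected.append(sps[0])
--                 used_cats.add(cat)
--                 if len(selected) == 3:
--                     break
--
--     return selected
-- ===== SOURCE B (Python) =====
-- from collections import defaultdict
--
-- def pick_sweep_prompts(prompt_groups):
--     """Pick 3 diverse prompts for LR sweep (one each from different categories)."""
--     by_category = defaultdict(list)
--     for sp_id, entries in prompt_groups.items():
--         by_category[entries[0]["category"]].append(sp_id)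
--
--     preferred = ["persona", "simulation", "composite", "educational", "professional"]
--     # Stable sort the categories by preference rank (non-preferred rank = 5 keeps
--     # dict-insertion order among themselves), then take the first prompt of the
--     # first three categories.
--     ranked = sorted(by_category.items(),
--                     key=lambda kv: preferred.index(kv[0]) if kv[0] in preferred else len(preferred))
--     return [sps[0] for _, sps in ranked[:3]]
-- ===== Notes on version B (the rewrite author's own statement) =====
-- stated objective: alternative
-- what changed: A's two stateful selection loops (selected/used_cats accumulators with break-at-3 and a fill pass) are replaced by a single stable sort of the category groups by preference rank (non-preferred categories share the maximal rank, so stability keeps their insertion order) followed by slicing the first three; the grouping pass is kept.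
import Mathlib
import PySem

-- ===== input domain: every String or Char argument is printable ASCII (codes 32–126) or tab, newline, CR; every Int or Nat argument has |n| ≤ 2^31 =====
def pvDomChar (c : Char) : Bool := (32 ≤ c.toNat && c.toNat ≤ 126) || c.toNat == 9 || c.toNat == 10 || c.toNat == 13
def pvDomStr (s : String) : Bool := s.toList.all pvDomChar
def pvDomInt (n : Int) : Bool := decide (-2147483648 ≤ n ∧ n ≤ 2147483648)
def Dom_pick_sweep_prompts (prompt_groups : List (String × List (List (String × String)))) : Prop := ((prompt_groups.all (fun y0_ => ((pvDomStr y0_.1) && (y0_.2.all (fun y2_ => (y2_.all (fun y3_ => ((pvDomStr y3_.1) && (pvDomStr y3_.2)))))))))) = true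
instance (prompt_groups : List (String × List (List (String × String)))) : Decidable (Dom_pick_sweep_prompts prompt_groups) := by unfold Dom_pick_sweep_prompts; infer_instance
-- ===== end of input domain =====

-- B replaces A's two stateful selection loops (selected/used_cats accumulators with break-at-3 and
-- a fill pass) by one stable sort of the category groups by preference rank, sliced to 3; the
-- grouping pass is kept. Objective: alternative (same asymptotics on these small category counts).

-- ===== PORT A =====
-- first pass, identical in Source A and Source B: by_category = defaultdict(list); by_category[entries[0]["category"]].append(sp_id)
def pvBuild (prompt_groups : List (String × List (List (String × String)))) : PySem.Dict String (List String) :=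
  prompt_groups.foldl
    (fun d p =>
      d.modify ((PySem.Dict.ofList (p.2.headD [])).getD "category" "") [] (fun l => l ++ [p.1]))
    PySem.Dict.empty

def pvPreferred : List String := ["persona", "simulation", "composite", "educational", "professional"]

-- A's first selection loop: over preferred, with used_cats and break at len(selected) == 3
def pvPhase1 (d : PySem.Dict String (List String)) :
    List String → List String → PySem.Set String → List String × PySem.Set String
  | [], sel, used => (sel, used)
  | c :: cs, sel, used =>
    if d.contains c && !(PySem.Set.contains used c) then
      let sel' := sel ++ [(PySem.List.pyGet? (d.getD c []) 0).getD ""]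
      let used' := PySem.Set.add used c
      if sel'.length == 3 then (sel', used') else pvPhase1 d cs sel' used'
    else pvPhase1 d cs sel used

-- A's fill loop: over by_category.items(), skipping used_cats, break at 3
def pvPhase2 : List (String × List String) → List String → PySem.Set String → List String
  | [], sel, _ => sel
  | (c, sps) :: rest, sel, used =>
    if !(PySem.Set.contains used c) then
      let sel' := sel ++ [(PySem.List.pyGet? sps 0).getD ""]
      if sel'.length == 3 then sel' else pvPhase2 rest sel' (PySem.Set.add used c)
    else pvPhase2 rest sel used

def pick_sweep_prompts (prompt_groups : List (String × List (List (String × String)))) : List String :=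
  let by_category := pvBuild prompt_groups
  let r := pvPhase1 by_category pvPreferred [] PySem.Set.empty
  if r.1.length < 3 then pvPhase2 by_category.items r.1 r.2 else r.1

-- ===== PORT B =====
-- key=lambda kv: preferred.index(kv[0]) if kv[0] in preferred else len(preferred)
def pvRank (c : String) : Int :=
  if pvPreferred.contains c then ((PySem.List.index? pvPreferred c).getD 0 : Nat) else 5

def pick_sweep_prompts_alt (prompt_groups : List (String × List (List (String × String)))) : List String :=
  let by_category := pvBuild prompt_groups
  let ranked := PySem.List.sorted by_category.items (fun kv => pvRank kv.1)
  (ranked.take 3).map (fun kv => (PySem.List.pyGet? kv.2 0).getD "")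

-- ===== PRECONDITION & SPEC =====
-- Pre_ excludes association lists with duplicate group ids, which encode no Python dict (prompt_groups
-- is a dict, whose keys are necessarily distinct), and groups whose entry list is empty or whose first
-- entry has no "category" key, on which A raises IndexError resp. KeyError.
def Pre_pick_sweep_prompts (prompt_groups : List (String × List (List (String × String)))) : Prop :=
  (prompt_groups.map (·.1)).Nodup ∧
  ∀ p ∈ prompt_groups, p.2 ≠ [] ∧ "category" ∈ (p.2.headD []).map (·.1)
instance (prompt_groups : List (String × List (List (String × String)))) : Decidable (Pre_pick_sweep_prompts prompt_groups) := by unfold Pre_pick_sweep_prompts; infer_instance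

def pvWitness_pick_sweep_prompts : (List (String × List (List (String × String)))) :=
  [("sp1", [[("category", "persona")]]), ("sp2", [[("category", "zeta")]])]

def Spec_pick_sweep_prompts (prompt_groups : List (String × List (List (String × String)))) (out : List String) : Prop := out = pick_sweep_prompts_alt prompt_groups
instance (prompt_groups : List (String × List (List (String × String)))) (out : List String) : Decidable (Spec_pick_sweep_prompts prompt_groups out) := by unfold Spec_pick_sweep_prompts; infer_instance

-- ===== CLAIM (what is proved, stated in full; the proofs are below) =====
def Claim_equal_pick_sweep_prompts : Prop := ∀ (prompt_groups : List (String × List (List (String × String)))), Dom_pick_sweep_prompts prompt_groups → Pre_pick_sweep_prompts prompt_groups → Spec_pick_sweep_prompts prompt_groups (pick_sweep_prompts prompt_groups)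

-- ===== LEMMAS AND PROOFS =====

-- the common canonical value both ports are reduced to: first prompt of each of the first three
-- categories, preferred-present first, then the rest in insertion order
def pvCanon (prompt_groups : List (String × List (List (String × String)))) : List String :=
  let d := pvBuild prompt_groups
  ((pvPreferred.filter (fun c => d.contains c) ++
    d.keys.filter (fun c => !(pvPreferred.contains c))).take 3).map
    (fun c => (PySem.List.pyGet? (d.getD c []) 0).getD "")

-- ---- A-side: the two loops produce pvCanon ----

-- A's first loop keeps, in order, the first prompt of each preferred category present, capped at 3.
theorem pvPhase1_spec (d : PySem.Dict String (List String)) :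
    ∀ (cs : List String) (sel : List String) (used : PySem.Set String),
      cs.Nodup → (∀ c ∈ cs, c ∉ used) → sel.length < 3 →
      (pvPhase1 d cs sel used).1 =
        sel ++ (((cs.filter (fun c => d.contains c)).map
          (fun c => (PySem.List.pyGet? (d.getD c []) 0).getD "")).take (3 - sel.length)) := by
  intro cs
  induction cs with
  | nil => intro sel used _ _ _; simp [pvPhase1]
  | cons c cs ih =>
    intro sel used hnd hused hlen
    have hcu : PySem.Set.contains used c = false := by
      rw [Bool.eq_false_iff]
      intro h
      exact hused c (by simp) ((PySem.Set.contains_iff _ _).mp h)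
    by_cases hc : d.contains c = true
    · rw [pvPhase1]
      simp only [hc, hcu, Bool.not_false, Bool.and_true, if_true]
      by_cases h3 : sel.length + 1 = 3
      · have : (sel ++ [(PySem.List.pyGet? (d.getD c []) 0).getD ""]).length == 3 := by
          simp [h3]
        simp only [this, if_true]
        have : 3 - sel.length = 1 := by omega
        simp [hc, this]
      · have hne : ((sel ++ [(PySem.List.pyGet? (d.getD c []) 0).getD ""]).length == 3) = false := by
          simp; omega
        simp only [hne, Bool.false_eq_true, if_false]
        rw [ih _ _ (List.Nodup.of_cons hnd)
            (fun c' hc' => by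
              rw [PySem.Set.mem_add]
              rintro (h | rfl)
              · exact hused c' (by simp [hc']) h
              · exact (List.nodup_cons.mp hnd).1 hc')
            (by simp; omega)]
        have ht : 3 - sel.length = (3 - (sel.length + 1)) + 1 := by omega
        simp only [List.filter_cons, hc, if_true, List.map_cons, List.length_append,
          List.length_singleton, ht, List.take_succ_cons, List.append_assoc,
          List.cons_append, List.nil_append]
    · rw [pvPhase1]
      have hc' : d.contains c = false := by simp [hc]
      simp only [hc', Bool.false_and, Bool.false_eq_true, if_false]
      rw [ih _ _ (List.Nodup.of_cons hnd) (fun c' h => hused c' (by simp [h])) hlen]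
      simp [hc']

-- when fewer than 3 preferred categories are present the loop consumes them all without breaking
theorem pvPhase1_full (d : PySem.Dict String (List String)) :
    ∀ (cs : List String) (sel : List String) (used : PySem.Set String),
      cs.Nodup → (∀ c ∈ cs, c ∉ used) →
      sel.length + (cs.filter (fun c => d.contains c)).length < 3 →
      pvPhase1 d cs sel used =
        (sel ++ ((cs.filter (fun c => d.contains c)).map
           (fun c => (PySem.List.pyGet? (d.getD c []) 0).getD "")),
         used ++ cs.filter (fun c => d.contains c)) := by
  intro cs
  induction cs with
  | nil => intro sel used _ _ _; simp [pvPhase1]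
  | cons c cs ih =>
    intro sel used hnd hused hlen
    have hcu : PySem.Set.contains used c = false := by
      rw [Bool.eq_false_iff]
      intro h
      exact hused c (by simp) ((PySem.Set.contains_iff _ _).mp h)
    by_cases hc : d.contains c = true
    · rw [pvPhase1]
      simp only [hc, hcu, Bool.not_false, Bool.and_true, if_true]
      have hfc : List.filter (fun c => d.contains c) (c :: cs)
          = c :: List.filter (fun c => d.contains c) cs := by
        simp [hc]
      rw [hfc] at hlen ⊢
      have hne : ((sel ++ [(PySem.List.pyGet? (d.getD c []) 0).getD ""]).length == 3) = false := by
        simp at hlen ⊢; omega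
      simp only [hne, Bool.false_eq_true, if_false]
      rw [ih _ _ (List.Nodup.of_cons hnd)
          (fun c' hc' => by
            rw [PySem.Set.mem_add]
            rintro (h | rfl)
            · exact hused c' (by simp [hc']) h
            · exact (List.nodup_cons.mp hnd).1 hc')
          (by simp at hlen ⊢; omega)]
      rw [PySem.Set.add_of_not_mem (hused c (by simp))]
      simp
    · rw [pvPhase1]
      have hc' : d.contains c = false := by simp [hc]
      simp only [hc', Bool.false_and, Bool.false_eq_true, if_false]
      have hfc : List.filter (fun c => d.contains c) (c :: cs)
          = List.filter (fun c => d.contains c) cs := by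
        simp [hc']
      rw [hfc] at hlen ⊢
      exact ih _ _ (List.Nodup.of_cons hnd) (fun c' h => hused c' (by simp [h])) hlen

-- A's fill loop appends, in order, the first prompt of each not-yet-used category, capped at 3 in total
theorem pvPhase2_spec :
    ∀ (L : List (String × List String)) (sel : List String) (used : PySem.Set String),
      (L.map (·.1)).Nodup → sel.length < 3 →
      pvPhase2 L sel used =
        sel ++ (((L.filter (fun p => !(PySem.Set.contains used p.1))).map
          (fun p => (PySem.List.pyGet? p.2 0).getD "")).take (3 - sel.length)) := by
  intro L
  induction L with
  | nil => intro sel used _ _; simp [pvPhase2]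
  | cons p rest ih =>
    obtain ⟨c, sps⟩ := p
    intro sel used hnd hlen
    rw [pvPhase2]
    by_cases hcu : PySem.Set.contains used c = true
    · simp only [hcu, Bool.not_true, Bool.false_eq_true, if_false]
      have hm : c ∈ used := (PySem.Set.contains_iff _ _).mp hcu
      rw [ih _ _ (by simpa using hnd.of_cons) hlen]
      simp [hm]
    · have hcu' : PySem.Set.contains used c = false := by rw [Bool.eq_false_iff]; exact hcu
      simp only [hcu', Bool.not_false, if_true]
      by_cases h3 : sel.length + 1 = 3
      · have ht : ((sel ++ [(PySem.List.pyGet? sps 0).getD ""]).length == 3) = true := by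
          simp [h3]
        simp only [ht, if_true]
        have hm : c ∉ used := by
          intro h; rw [(PySem.Set.contains_iff _ _).mpr h] at hcu'; exact absurd hcu' (by simp)
        have h1 : 3 - sel.length = 1 := by omega
        simp [hm, h1]
      · have hne : ((sel ++ [(PySem.List.pyGet? sps 0).getD ""]).length == 3) = false := by
          simp; omega
        simp only [hne, Bool.false_eq_true, if_false]
        rw [ih _ _ (by simpa using hnd.of_cons) (by simp; omega)]
        have hfs : rest.filter (fun p => !(PySem.Set.contains (PySem.Set.add used c) p.1))
            = rest.filter (fun p => !(PySem.Set.contains used p.1)) := by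
          apply List.filter_congr
          intro q hq
          have hqc : q.1 ≠ c := by
            rw [List.map_cons] at hnd
            intro h
            have hm2 : q.1 ∈ List.map (fun x => x.1) rest := List.mem_map_of_mem hq
            rw [h] at hm2
            exact (List.nodup_cons.mp hnd).1 hm2
          have hiff : q.1 ∈ PySem.Set.add used c ↔ q.1 ∈ used := by
            rw [PySem.Set.mem_add]
            exact ⟨fun h => h.resolve_right hqc, Or.inl⟩
          congr 1
          rw [Bool.eq_iff_iff, PySem.Set.contains_iff, PySem.Set.contains_iff]
          exact hiff
        rw [hfs]
        have ht : 3 - sel.length = (3 - (sel.length + 1)) + 1 := by omega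
        simp only [List.filter_cons, hcu', Bool.not_false, if_true, List.map_cons,
          List.length_append, List.length_singleton, ht, List.take_succ_cons,
          List.append_assoc, List.singleton_append]

theorem pv_mainA (pgs : List (String × List (List (String × String)))) :
    pick_sweep_prompts pgs = pvCanon pgs := by
  unfold pick_sweep_prompts pvCanon
  dsimp only
  have hnd : (pvBuild pgs).keys.Nodup := by
    unfold pvBuild
    exact PySem.Dict.nodup_keys_foldl_modify_key pgs
      (fun p => (PySem.Dict.ofList (p.2.headD [])).getD "category" "") []
      (fun d p => fun l => l ++ [p.1]) PySem.Dict.empty (by simp)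
  have hprefnd : pvPreferred.Nodup := by decide
  have h1 := pvPhase1_spec (pvBuild pgs) pvPreferred [] PySem.Set.empty hprefnd
    (by simp [PySem.Set.empty]) (by simp)
  simp only [List.nil_append, List.length_nil, Nat.sub_zero] at h1
  by_cases hlen : 3 ≤ (pvPreferred.filter (fun c => (pvBuild pgs).contains c)).length
  · -- at least 3 preferred categories present: phase1 fills all 3, no fill pass
    have hl : ((pvPhase1 (pvBuild pgs) pvPreferred [] PySem.Set.empty).1).length = 3 := by
      rw [h1]; simp; omega
    rw [if_neg (by omega), h1, List.take_append]
    have h0 : 3 - (List.filter (fun c => (pvBuild pgs).contains c) pvPreferred).length = 0 := by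
      omega
    rw [h0, List.take_zero, List.append_nil, List.map_take]
  · -- fewer than 3: phase1 takes every preferred category present, the fill pass takes the rest
    rw [not_le] at hlen
    have hfull := pvPhase1_full (pvBuild pgs) pvPreferred [] PySem.Set.empty hprefnd
      (by simp [PySem.Set.empty]) (by simpa using hlen)
    rw [hfull]
    simp only [List.nil_append, PySem.Set.empty]
    have hitemsnd : ((pvBuild pgs).items.map (·.1)).Nodup := by
      simpa only [PySem.Dict.keys] using hnd
    rw [pvPhase2_spec (pvBuild pgs).items
        (List.map (fun c => (PySem.List.pyGet? ((pvBuild pgs).getD c []) 0).getD "")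
          (List.filter (fun c => (pvBuild pgs).contains c) pvPreferred))
        (List.filter (fun c => (pvBuild pgs).contains c) pvPreferred)
        hitemsnd (by simpa using hlen)]
    rw [PySem.Dict.items_eq_map_keys (pvBuild pgs) hnd []]
    rw [List.filter_map, List.map_map]
    have hQ : (pvBuild pgs).keys.filter
        ((fun p : String × List String => !(PySem.Set.contains (List.filter (fun c => (pvBuild pgs).contains c) pvPreferred) p.1)) ∘ (fun k => (k, (pvBuild pgs).getD k [])))
        = (pvBuild pgs).keys.filter (fun c => !(pvPreferred.contains c)) := by
      apply List.filter_congr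
      intro k hk
      have hdk : (pvBuild pgs).contains k = true := (PySem.Dict.contains_iff_mem_keys _ _).mpr hk
      simp only [Function.comp]
      congr 1
      rw [Bool.eq_iff_iff, PySem.Set.contains_iff]
      simp [List.mem_filter, hdk]
    rw [hQ]
    have hg : ((fun p : String × List String => (PySem.List.pyGet? p.2 0).getD "") ∘ (fun k => (k, (pvBuild pgs).getD k [])))
        = (fun c => (PySem.List.pyGet? ((pvBuild pgs).getD c []) 0).getD "") := by
      funext k; simp
    rw [hg]
    rw [List.take_append, List.take_of_length_le (le_of_lt hlen), List.map_append]
    simp only [List.map_take, List.length_map]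
    rw [if_pos hlen]

-- ---- B-side: the stable sort by rank produces pvCanon ----

def pvKey (p : String × List String) : Int := pvRank p.1

theorem pvContains_iff (c : String) :
    pvPreferred.contains c = true ↔ c = "persona" ∨ c = "simulation" ∨ c = "composite" ∨
      c = "educational" ∨ c = "professional" := by
  constructor
  · intro h
    rcases List.contains_iff_exists_mem_beq.mp h with ⟨a, ha, hb⟩
    have := eq_of_beq hb
    subst this
    simpa [pvPreferred] using ha
  · rintro (rfl | rfl | rfl | rfl | rfl) <;> decide

-- the rank table, read off from preferred.index
theorem pvRank_cases (c : String) :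
    (c = "persona" ∧ pvRank c = 0) ∨ (c = "simulation" ∧ pvRank c = 1) ∨
    (c = "composite" ∧ pvRank c = 2) ∨ (c = "educational" ∧ pvRank c = 3) ∨
    (c = "professional" ∧ pvRank c = 4) ∨ (pvPreferred.contains c = false ∧ pvRank c = 5) := by
  by_cases hc : pvPreferred.contains c = true
  · rcases (pvContains_iff c).mp hc with rfl | rfl | rfl | rfl | rfl
    · exact Or.inl ⟨rfl, by decide⟩
    · exact Or.inr (Or.inl ⟨rfl, by decide⟩)
    · exact Or.inr (Or.inr (Or.inl ⟨rfl, by decide⟩))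
    · exact Or.inr (Or.inr (Or.inr (Or.inl ⟨rfl, by decide⟩)))
    · exact Or.inr (Or.inr (Or.inr (Or.inr (Or.inl ⟨rfl, by decide⟩))))
  · have hc' : pvPreferred.contains c = false := Bool.eq_false_iff.mpr hc
    refine Or.inr (Or.inr (Or.inr (Or.inr (Or.inr ⟨hc', ?_⟩))))
    unfold pvRank
    rw [hc']
    simp

theorem pvKey_range (p : String × List String) :
    pvKey p = 0 ∨ pvKey p = 1 ∨ pvKey p = 2 ∨ pvKey p = 3 ∨ pvKey p = 4 ∨ pvKey p = 5 := by
  have h := pvRank_cases p.1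
  unfold pvKey
  tauto

-- inserting behind every non-smaller element: the stable position of insertion sort
theorem pvInsertBy_mid {α : Type} (before : α → α → Bool) (x : α) :
    ∀ (l1 l2 : List α), (∀ y ∈ l1, before x y = false) → (∀ y ∈ l2, before x y = true) →
      PySem.List.insertBy before x (l1 ++ l2) = l1 ++ x :: l2 := by
  intro l1
  induction l1 with
  | nil =>
    intro l2 _ h2
    cases l2 with
    | nil => rfl
    | cons z zs => simp [PySem.List.insertBy, h2 z (by simp)]
  | cons a l1 ih =>
    intro l2 h1 h2
    have ha : before x a = false := h1 a (by simp)
    simp only [List.cons_append, PySem.List.insertBy, ha, Bool.false_eq_true, if_false]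
    rw [ih l2 (fun y hy => h1 y (by simp [hy])) h2]

-- the six rank buckets; stable sort keeps them in rank order, insertion order inside each
def pvB (i : Int) (ys : List (String × List String)) : List (String × List String) :=
  ys.filter (fun p => pvKey p == i)
def pvBform (ys : List (String × List String)) : List (String × List String) :=
  pvB 0 ys ++ pvB 1 ys ++ pvB 2 ys ++ pvB 3 ys ++ pvB 4 ys ++ pvB 5 ys

theorem pvKey_of_mem_pvB {i : Int} {ys : List (String × List String)}
    {y : String × List String} (h : y ∈ pvB i ys) : pvKey y = i := by
  unfold pvB at h
  have := (List.mem_filter.mp h).2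
  simpa using this

-- one insertion-sort step keeps the six buckets, appending x at the end of its own bucket
theorem pvStep (x : String × List String) (ys : List (String × List String)) :
    PySem.List.insertBy (fun a b => decide (pvKey a < pvKey b)) x (pvBform ys)
      = pvBform (ys ++ [x]) := by
  have hB : ∀ i : Int, pvB i (ys ++ [x]) = pvB i ys ++ (if pvKey x == i then [x] else []) := by
    intro i
    unfold pvB
    rw [List.filter_append]
    cases h : (pvKey x == i) <;> simp [List.filter, h]
  have hmid : ∀ (l1 l2 : List (String × List String)),
      (∀ y ∈ l1, ¬ (pvKey x < pvKey y)) → (∀ y ∈ l2, pvKey x < pvKey y) →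
      PySem.List.insertBy (fun a b => decide (pvKey a < pvKey b)) x (l1 ++ l2) = l1 ++ x :: l2 :=
    fun l1 l2 a b => pvInsertBy_mid _ _ l1 l2 (fun y hy => by simp [a y hy]) (fun y hy => by simp [b y hy])
  rw [pvBform, pvBform, hB 0, hB 1, hB 2, hB 3, hB 4, hB 5]
  rcases pvKey_range x with hr | hr | hr | hr | hr | hr <;> rw [hr]
  · have h2 : ∀ y ∈ pvB 1 ys ++ pvB 2 ys ++ pvB 3 ys ++ pvB 4 ys ++ pvB 5 ys, pvKey x < pvKey y := by
      intro y hy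
      simp only [List.mem_append] at hy
      rcases hy with ((((h | h) | h) | h) | h) <;> rw [pvKey_of_mem_pvB h, hr] <;> omega
    have := hmid (pvB 0 ys) (pvB 1 ys ++ pvB 2 ys ++ pvB 3 ys ++ pvB 4 ys ++ pvB 5 ys)
      (fun y hy => by rw [pvKey_of_mem_pvB hy, hr]; omega) h2
    simp only [List.append_assoc] at this ⊢
    simp [this]
  · have h2 : ∀ y ∈ pvB 2 ys ++ pvB 3 ys ++ pvB 4 ys ++ pvB 5 ys, pvKey x < pvKey y := by
      intro y hy
      simp only [List.mem_append] at hy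
      rcases hy with (((h | h) | h) | h) <;> rw [pvKey_of_mem_pvB h, hr] <;> omega
    have h1 : ∀ y ∈ pvB 0 ys ++ pvB 1 ys, ¬ (pvKey x < pvKey y) := by
      intro y hy
      simp only [List.mem_append] at hy
      rcases hy with (h | h) <;> rw [pvKey_of_mem_pvB h, hr] <;> omega
    have := hmid (pvB 0 ys ++ pvB 1 ys) (pvB 2 ys ++ pvB 3 ys ++ pvB 4 ys ++ pvB 5 ys) h1 h2
    simp only [List.append_assoc] at this ⊢
    simp [this]
  · have h2 : ∀ y ∈ pvB 3 ys ++ pvB 4 ys ++ pvB 5 ys, pvKey x < pvKey y := by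
      intro y hy
      simp only [List.mem_append] at hy
      rcases hy with ((h | h) | h) <;> rw [pvKey_of_mem_pvB h, hr] <;> omega
    have h1 : ∀ y ∈ pvB 0 ys ++ pvB 1 ys ++ pvB 2 ys, ¬ (pvKey x < pvKey y) := by
      intro y hy
      simp only [List.mem_append] at hy
      rcases hy with ((h | h) | h) <;> rw [pvKey_of_mem_pvB h, hr] <;> omega
    have := hmid (pvB 0 ys ++ pvB 1 ys ++ pvB 2 ys) (pvB 3 ys ++ pvB 4 ys ++ pvB 5 ys) h1 h2
    simp only [List.append_assoc] at this ⊢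
    simp [this]
  · have h2 : ∀ y ∈ pvB 4 ys ++ pvB 5 ys, pvKey x < pvKey y := by
      intro y hy
      simp only [List.mem_append] at hy
      rcases hy with (h | h) <;> rw [pvKey_of_mem_pvB h, hr] <;> omega
    have h1 : ∀ y ∈ pvB 0 ys ++ pvB 1 ys ++ pvB 2 ys ++ pvB 3 ys, ¬ (pvKey x < pvKey y) := by
      intro y hy
      simp only [List.mem_append] at hy
      rcases hy with (((h | h) | h) | h) <;> rw [pvKey_of_mem_pvB h, hr] <;> omega
    have := hmid (pvB 0 ys ++ pvB 1 ys ++ pvB 2 ys ++ pvB 3 ys) (pvB 4 ys ++ pvB 5 ys) h1 h2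
    simp only [List.append_assoc] at this ⊢
    simp [this]
  · have h1 : ∀ y ∈ pvB 0 ys ++ pvB 1 ys ++ pvB 2 ys ++ pvB 3 ys ++ pvB 4 ys, ¬ (pvKey x < pvKey y) := by
      intro y hy
      simp only [List.mem_append] at hy
      rcases hy with ((((h | h) | h) | h) | h) <;> rw [pvKey_of_mem_pvB h, hr] <;> omega
    have := hmid (pvB 0 ys ++ pvB 1 ys ++ pvB 2 ys ++ pvB 3 ys ++ pvB 4 ys) (pvB 5 ys) h1
      (fun y hy => by rw [pvKey_of_mem_pvB hy, hr]; omega)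
    simp only [List.append_assoc] at this ⊢
    simp [this]
  · have := hmid (pvB 0 ys ++ pvB 1 ys ++ pvB 2 ys ++ pvB 3 ys ++ pvB 4 ys ++ pvB 5 ys) []
      (fun y hy => by
        simp only [List.mem_append] at hy
        rcases hy with (((((h | h) | h) | h) | h) | h) <;> rw [pvKey_of_mem_pvB h, hr] <;> omega)
      (by simp)
    simp only [List.append_assoc, List.append_nil] at this ⊢
    simp [this]

-- the whole insertion sort, bucket by bucket
theorem pvFold :
    ∀ (xs ys : List (String × List String)),
      xs.foldl (fun acc x => PySem.List.insertBy (fun a b => decide (pvKey a < pvKey b)) x acc)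
        (pvBform ys) = pvBform (ys ++ xs) := by
  intro xs
  induction xs with
  | nil => intro ys; simp
  | cons x xs ih =>
    intro ys
    rw [List.foldl_cons, pvStep x ys, ih (ys ++ [x])]
    simp

theorem pvSorted_eq (xs : List (String × List String)) :
    PySem.List.sorted xs (fun kv => pvRank kv.1) = pvBform xs := by
  rw [PySem.List.sorted_eq_foldl_insertBy]
  have h := pvFold xs []
  have h0 : pvBform ([] : List (String × List String)) = [] := rfl
  rw [h0] at h
  simpa using h

-- beq characterisations of the six buckets
theorem pvStr_beq_of_ne {c s : String} (h : ¬ c = s) : (c == s) = false := by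
  cases hb : c == s
  · rfl
  · exact absurd (eq_of_beq hb) h

theorem pvBeq_pref (p : String × List String) (s : String) (r : Int)
    (hs : pvRank s = r) (hinj : ∀ c : String, pvRank c = r → c = s) :
    (pvKey p == r) = (p.1 == s) := by
  by_cases h : p.1 = s
  · rw [show pvKey p = pvRank p.1 from rfl, h, hs]
    simp
  · rw [pvStr_beq_of_ne h]
    cases hb : (pvKey p == r)
    · rfl
    · exact absurd (hinj p.1 (eq_of_beq hb)) h

theorem pvBeq5 (p : String × List String) :
    (pvKey p == (5 : Int)) = !(pvPreferred.contains p.1) := by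
  rcases pvRank_cases p.1 with ⟨h, e⟩ | ⟨h, e⟩ | ⟨h, e⟩ | ⟨h, e⟩ | ⟨h, e⟩ | ⟨h, e⟩ <;>
    rw [show pvKey p = pvRank p.1 from rfl, e] <;> rw [h] <;> decide

-- bucket i < 5 is exactly the (at most one) group of the i-th preferred category
theorem pvRank_injective (c : String) :
    (pvRank c = 0 → c = "persona") ∧ (pvRank c = 1 → c = "simulation") ∧
    (pvRank c = 2 → c = "composite") ∧ (pvRank c = 3 → c = "educational") ∧
    (pvRank c = 4 → c = "professional") := by
  rcases pvRank_cases c with ⟨h, e⟩ | ⟨h, e⟩ | ⟨h, e⟩ | ⟨h, e⟩ | ⟨h, e⟩ | ⟨h, e⟩ <;>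
    refine ⟨?_, ?_, ?_, ?_, ?_⟩ <;> intro he <;> first | exact h | omega

-- a nodup list filtered for one key
theorem pvFilter_beq_nodup (l : List String) (h : l.Nodup) (s : String) :
    l.filter (fun c => c == s) = if s ∈ l then [s] else [] := by
  have : (fun c => c == s) = (· == s) := rfl
  rw [this, List.filter_beq]
  by_cases hm : s ∈ l
  · rw [if_pos hm, List.count_eq_one_of_mem h hm]
    rfl
  · rw [if_neg hm, List.count_eq_zero_of_not_mem hm]
    rfl

theorem pvMap_ite_singleton {α : Type} (g : String → α) (P : Prop) [Decidable P] (s : String) :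
    (if P then [s] else []).map g = if P then [g s] else [] := by
  split_ifs <;> rfl

theorem pvFilterMap_flatten {α : Type} (P : String → Bool) (g : String → α) :
    ∀ l : List String, (l.filter P).map g = (l.map (fun c => if P c then [g c] else [])).flatten := by
  intro l
  induction l with
  | nil => rfl
  | cons a l ih =>
    rw [List.filter_cons]
    cases hP : P a <;> simp [hP, ih]

-- the bucket decomposition of items IS the priority-ordered category list, mapped to its groups
theorem pvBform_eq (d : PySem.Dict String (List String)) (hnd : d.keys.Nodup) :
    pvBform d.items =
      ((pvPreferred.filter (fun c => d.contains c) ++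
        d.keys.filter (fun c => !(pvPreferred.contains c))).map (fun k => (k, d.getD k []))) := by
  have hitems : d.items = d.keys.map (fun k => (k, d.getD k [])) :=
    PySem.Dict.items_eq_map_keys d hnd []
  have hbucket : ∀ (s : String) (r : Int), pvRank s = r → (∀ c : String, pvRank c = r → c = s) →
      pvB r d.items = if d.contains s then [(s, d.getD s [])] else [] := by
    intro s r hs hinj
    unfold pvB
    have hp : (fun p : String × List String => pvKey p == r) = (fun p => p.1 == s) :=
      funext (fun p => pvBeq_pref p s r hs hinj)
    rw [hp, hitems, List.filter_map]
    have hcomp : ((fun p : String × List String => p.1 == s) ∘ (fun k => (k, d.getD k []))) =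
        (fun c => c == s) := rfl
    rw [hcomp, pvFilter_beq_nodup d.keys hnd s, pvMap_ite_singleton]
    exact if_congr (PySem.Dict.contains_iff_mem_keys _ _).symm rfl rfl
  have hB5 : pvB 5 d.items =
      (d.keys.filter (fun c => !(pvPreferred.contains c))).map (fun k => (k, d.getD k [])) := by
    unfold pvB
    have hp : (fun p : String × List String => pvKey p == (5 : Int)) =
        (fun p : String × List String => !(pvPreferred.contains p.1)) := funext pvBeq5
    rw [hp, hitems, List.filter_map]
    rfl
  have hI := fun c => pvRank_injective c
  rw [pvBform,
    hbucket "persona" 0 (by decide) (fun c h => (hI c).1 h),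
    hbucket "simulation" 1 (by decide) (fun c h => (hI c).2.1 h),
    hbucket "composite" 2 (by decide) (fun c h => (hI c).2.2.1 h),
    hbucket "educational" 3 (by decide) (fun c h => (hI c).2.2.2.1 h),
    hbucket "professional" 4 (by decide) (fun c h => (hI c).2.2.2.2 h),
    hB5, List.map_append,
    pvFilterMap_flatten (fun c => d.contains c) (fun k => (k, d.getD k [])) pvPreferred]
  simp only [pvPreferred, List.map_cons, List.map_nil, List.flatten_cons, List.flatten_nil,
    List.append_assoc, List.append_nil]

theorem pv_mainB (pgs : List (String × List (List (String × String)))) :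
    pick_sweep_prompts_alt pgs = pvCanon pgs := by
  unfold pick_sweep_prompts_alt pvCanon
  dsimp only
  have hnd : (pvBuild pgs).keys.Nodup := by
    unfold pvBuild
    exact PySem.Dict.nodup_keys_foldl_modify_key pgs
      (fun p => (PySem.Dict.ofList (p.2.headD [])).getD "category" "") []
      (fun d p => fun l => l ++ [p.1]) PySem.Dict.empty (by simp)
  rw [pvSorted_eq, pvBform_eq (pvBuild pgs) hnd, ← List.map_take, List.map_map]
  rfl

theorem pv_main (pgs : List (String × List (List (String × String)))) :
    pick_sweep_prompts pgs = pick_sweep_prompts_alt pgs := by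
  rw [pv_mainA, pv_mainB]

-- ===== VERDICT (by name: the statement is the Claim_ definition above) =====
theorem pick_sweep_prompts_spec : Claim_equal_pick_sweep_prompts := by
  intro prompt_groups _ _
  unfold Spec_pick_sweep_prompts
  exact pv_main prompt_groups
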